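-- pv_equiv track=rewrite | github.com/yeolsim2hajo/Team_hard | wonkyoung/programmers/level 0/배열의_유사도.py | solution
-- ===== SOURCE A (Python) =====
-- def solution(s1, s2):
--     s1.sort()
--     s2.sort()
--     s1_i = s2_i = answer = 0
--     s1_len, s2_len = len(s1), len(s2)
--     while s1_i < s1_len and s2_i < s2_len:
--         s1_el, s2_el = s1[s1_i], s2[s2_i]
--         if s1_el == s2_el:
--             answer += 1
--             s1_i += 1
--             s2_i += 1
--         elif s1_el < s2_el:
--             s1_i += 1
--         else:
--             s2_i += 1
--     return answer
-- ===== SOURCE B (Python) =====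
-- def solution(s1, s2):
--     counts = {}
--     for x in s1:
--         counts[x] = counts.get(x, 0) + 1
--     answer = 0
--     for x in s2:
--         if counts.get(x, 0) > 0:
--             counts[x] = counts.get(x, 0) - 1
--             answer += 1
--     return answer
-- ===== Notes on version B (the rewrite author's own statement) =====
-- stated objective: alternative
-- what changed: Replaces A's sort-both-then-two-pointer merge with a hash-count pass over s1 followed by a greedy decrement pass over s2; B does not sort, so unlike A it does not mutate its arguments (equivalence is about the return value).
import Mathlib
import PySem

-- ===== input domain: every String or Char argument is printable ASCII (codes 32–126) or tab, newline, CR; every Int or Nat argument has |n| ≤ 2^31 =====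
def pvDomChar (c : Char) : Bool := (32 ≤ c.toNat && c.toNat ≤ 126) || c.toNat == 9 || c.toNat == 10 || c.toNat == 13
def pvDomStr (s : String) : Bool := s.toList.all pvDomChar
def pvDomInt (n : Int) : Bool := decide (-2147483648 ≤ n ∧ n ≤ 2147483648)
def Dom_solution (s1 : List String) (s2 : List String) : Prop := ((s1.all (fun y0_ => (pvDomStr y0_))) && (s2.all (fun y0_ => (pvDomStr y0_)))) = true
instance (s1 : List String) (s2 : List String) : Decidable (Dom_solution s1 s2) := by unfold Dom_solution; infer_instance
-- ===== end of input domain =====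

-- B replaces A's sort-both-then-two-pointer merge by a dict count pass over s1 and a greedy
-- decrement pass over s2 (alternative decomposition); B does not sort, so unlike A it does
-- not mutate its arguments in place — the equivalence proved here is about the return value.

-- ===== PORT A =====
-- A's while loop over indices into the two sorted lists, as structural recursion on the
-- (suffixes of the) sorted lists; branches in A's order.
def twoPtrA : List String → List String → Int
  | [], _ => 0
  | _ :: _, [] => 0
  | a :: as, b :: bs =>
    if a = b then twoPtrA as bs + 1
    else if a < b then twoPtrA as (b :: bs)
    else twoPtrA (a :: as) bs
termination_by xs ys => xs.length + ys.length
decreasing_by all_goals (simp only [List.length_cons]; omega)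

def solution (s1 : List String) (s2 : List String) : Int :=
  twoPtrA (PySem.List.sorted s1 (fun x => x) false) (PySem.List.sorted s2 (fun x => x) false)

-- ===== PORT B =====
def solution_alt (s1 : List String) (s2 : List String) : Int :=
  let counts := s1.foldl (fun d x => d.insert x (d.getD x 0 + 1)) PySem.Dict.empty
  (s2.foldl
    (fun (p : PySem.Dict String Int × Int) x =>
      if p.1.getD x 0 > 0 then (p.1.insert x (p.1.getD x 0 - 1), p.2 + 1) else p)
    (counts, 0)).2

-- ===== PRECONDITION & SPEC =====
def Spec_solution (s1 : List String) (s2 : List String) (out : Int) : Prop := out = solution_alt s1 s2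
instance (s1 : List String) (s2 : List String) (out : Int) : Decidable (Spec_solution s1 s2 out) := by unfold Spec_solution; infer_instance

-- ===== CLAIM (what is proved, stated in full; the proofs are below) =====
def Claim_equal_solution : Prop := ∀ (s1 : List String) (s2 : List String), Dom_solution s1 s2 → Spec_solution s1 s2 (solution s1 s2)

-- ===== LEMMAS AND PROOFS =====

-- Peeling the head of the second list off a multiset intersection, head present in the first list.
theorem pvCardInterConsPos {α : Type} [DecidableEq α] (rem xs : List α) (x : α) (hx : x ∈ rem) :
    ((rem : Multiset α) ∩ (↑(x :: xs) : Multiset α)).card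
      = ((↑(rem.erase x) : Multiset α) ∩ (↑xs : Multiset α)).card + 1 := by
  rw [Multiset.inter_comm, ← Multiset.cons_coe,
    Multiset.cons_inter_of_pos _ (by simpa using hx), Multiset.card_cons,
    Multiset.coe_erase, Multiset.inter_comm]

-- Same, head absent from the first list.
theorem pvCardInterConsNeg {α : Type} [DecidableEq α] (rem xs : List α) (x : α) (hx : x ∉ rem) :
    ((rem : Multiset α) ∩ (↑(x :: xs) : Multiset α)).card
      = ((rem : Multiset α) ∩ (↑xs : Multiset α)).card := by
  rw [Multiset.inter_comm, ← Multiset.cons_coe,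
    Multiset.cons_inter_of_neg _ (by simpa using hx), Multiset.inter_comm]

-- A's merge on two sorted lists computes the multiset-intersection cardinality.
theorem twoPtrA_eq_inter : ∀ (a b : List String), a.Pairwise (· ≤ ·) → b.Pairwise (· ≤ ·) →
    twoPtrA a b = ((((a : Multiset String)) ∩ (b : Multiset String)).card : Int) := by
  intro a b
  induction a, b using twoPtrA.induct with
  | case1 b => intro _ _; simp [twoPtrA]
  | case2 a as => intro _ _; simp [twoPtrA]
  | case3 as b bs ih =>
    intro ha hb
    rw [twoPtrA, if_pos rfl,
      pvCardInterConsPos (b :: as) bs b (List.mem_cons_self), List.erase_cons_head,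
      ih ha.of_cons hb.of_cons]
    push_cast; ring
  | case4 a as b bs hne hlt ih =>
    intro ha hb
    have hnm : a ∉ b :: bs := by
      intro hm
      rcases List.mem_cons.mp hm with rfl | hy
      · exact hne rfl
      · exact absurd (lt_of_lt_of_le hlt (List.rel_of_pairwise_cons hb hy)) (lt_irrefl a)
    rw [twoPtrA, if_neg hne, if_pos hlt, Multiset.inter_comm,
      pvCardInterConsNeg (b :: bs) as a hnm, Multiset.inter_comm,
      ih ha.of_cons hb]
  | case5 a as b bs hne hlt ih =>
    intro ha hb
    have hba : b < a := lt_of_le_of_ne (not_lt.mp hlt) (fun h => hne h.symm)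
    have hnm : b ∉ a :: as := by
      intro hm
      rcases List.mem_cons.mp hm with rfl | hy
      · exact absurd hba (lt_irrefl b)
      · exact absurd (lt_of_lt_of_le hba (List.rel_of_pairwise_cons ha hy)) (lt_irrefl b)
    rw [twoPtrA, if_neg hne, if_neg hlt,
      pvCardInterConsNeg (a :: as) bs b hnm, ih ha hb.of_cons]

-- B's decrement loop: with the dict holding exactly the counts of a remaining multiset,
-- it adds the multiset-intersection cardinality to the accumulator.
theorem loopB_eq_inter (s2 : List String) :
    ∀ (d : PySem.Dict String Int) (rem : List String) (ans : Int),
    (∀ v, d.getD v 0 = (rem.count v : Int)) →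
    (s2.foldl
      (fun (p : PySem.Dict String Int × Int) x =>
        if p.1.getD x 0 > 0 then (p.1.insert x (p.1.getD x 0 - 1), p.2 + 1) else p)
      (d, ans)).2 = ans + ((((rem : Multiset String)) ∩ (s2 : Multiset String)).card : Int) := by
  induction s2 with
  | nil => intro d rem ans _; simp
  | cons x xs ih =>
    intro d rem ans hinv
    by_cases hx : x ∈ rem
    · have hpos : d.getD x 0 > 0 := by
        rw [hinv x]; exact_mod_cast List.count_pos_iff.mpr hx
      have hinv' : ∀ v, (d.insert x (d.getD x 0 - 1)).getD v 0 = ((rem.erase x).count v : Int) := by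
        intro v
        rw [PySem.Dict.getD_insert]
        by_cases hv : v = x
        · subst hv
          rw [if_pos rfl, hinv v, List.count_erase_self]
          have : 0 < rem.count v := List.count_pos_iff.mpr hx
          omega
        · rw [if_neg hv, hinv v, List.count_erase_of_ne hv]
      simp only [List.foldl_cons]
      rw [if_pos hpos, ih _ (rem.erase x) (ans + 1) hinv',
        pvCardInterConsPos rem xs x hx]
      push_cast; ring
    · have hng : ¬ (d.getD x 0 > 0) := by
        rw [hinv x, List.count_eq_zero_of_not_mem hx]; omega
      simp only [List.foldl_cons]
      rw [if_neg hng, ih d rem ans hinv, pvCardInterConsNeg rem xs x hx]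

theorem solution_alt_eq_inter (s1 s2 : List String) :
    solution_alt s1 s2 = ((((s1 : Multiset String)) ∩ (s2 : Multiset String)).card : Int) := by
  unfold solution_alt
  rw [loopB_eq_inter s2 _ s1 0 ?_]
  · ring
  · intro v
    rw [PySem.Dict.getD_foldl_insert_add_one, PySem.Dict.getD_empty]
    ring

-- ===== VERDICT (by name: the statement is the Claim_ definition above) =====
theorem solution_spec : Claim_equal_solution := by
  intro s1 s2 _
  unfold Spec_solution solution
  rw [twoPtrA_eq_inter _ _ ?_ ?_, solution_alt_eq_inter]
  · rw [Multiset.coe_eq_coe.mpr (PySem.List.sorted_perm s1 (fun x => x) false),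
      Multiset.coe_eq_coe.mpr (PySem.List.sorted_perm s2 (fun x => x) false)]
  · simpa using PySem.List.sorted_pairwise s1 (fun x => x)
  · simpa using PySem.List.sorted_pairwise s2 (fun x => x)
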